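-- pv_equiv track=rewrite | github.com/mhanssler/Clean_Cab | Smart_Sniffer/src/bme688_driver.py | _calc_gas_wait
-- ===== SOURCE A (Python) =====
-- def _calc_gas_wait(duration_ms: int) -> int:
--     """Calculate gas wait register value from duration in ms."""
--     if duration_ms < 64:
--         return duration_ms
--
--     factor = 0
--     while duration_ms > 63:
--         duration_ms //= 4
--         factor += 1
--         if factor > 3:
--             return 0xFF  # Max duration
--
--     return duration_ms + (factor * 64)
-- ===== SOURCE B (Python) =====
-- def _calc_gas_wait(duration_ms: int) -> int:
--     """Calculate gas wait register value from duration in ms (closed-form bracket selection)."""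
--     if duration_ms < 64:
--         return duration_ms
--     if duration_ms < 256:
--         return duration_ms // 4 + 64
--     if duration_ms < 1024:
--         return duration_ms // 16 + 128
--     if duration_ms < 4096:
--         return duration_ms // 64 + 192
--     return 0xFF
-- ===== Notes on version B (the rewrite author's own statement) =====
-- stated objective: simpler
-- what changed: Replaced the iterative divide-by-four loop with mutable factor state by a closed-form chain of threshold tests selecting one composed floor division per bracket.
import Mathlib
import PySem

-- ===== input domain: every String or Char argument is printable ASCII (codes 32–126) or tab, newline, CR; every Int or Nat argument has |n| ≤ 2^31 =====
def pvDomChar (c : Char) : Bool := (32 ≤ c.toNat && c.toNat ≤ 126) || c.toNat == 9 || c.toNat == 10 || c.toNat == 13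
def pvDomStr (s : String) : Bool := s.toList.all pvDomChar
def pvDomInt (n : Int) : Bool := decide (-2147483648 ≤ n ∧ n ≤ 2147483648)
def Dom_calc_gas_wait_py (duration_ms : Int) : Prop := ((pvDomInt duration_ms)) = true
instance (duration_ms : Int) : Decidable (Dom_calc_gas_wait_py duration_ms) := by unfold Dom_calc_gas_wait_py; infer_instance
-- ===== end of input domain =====

-- B replaces A's iterative divide-by-4 loop with a closed-form chain of threshold tests (objective: simpler).

-- ===== PORT A =====
-- A's while loop: state is (duration_ms, factor); terminates because factor grows past 3
def calcGasWaitLoop (duration_ms factor : Int) : Int :=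
  if duration_ms > 63 then
    let d' := PySem.Int.floordiv duration_ms 4
    let f' := factor + 1
    if f' > 3 then 255
    else calcGasWaitLoop d' f'
  else duration_ms + factor * 64
termination_by (4 - factor).toNat
decreasing_by omega

def calc_gas_wait_py (duration_ms : Int) : Int :=
  if duration_ms < 64 then duration_ms
  else calcGasWaitLoop duration_ms 0

-- ===== PORT B =====
def calc_gas_wait_py_alt (duration_ms : Int) : Int :=
  if duration_ms < 64 then duration_ms
  else if duration_ms < 256 then PySem.Int.floordiv duration_ms 4 + 64
  else if duration_ms < 1024 then PySem.Int.floordiv duration_ms 16 + 128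
  else if duration_ms < 4096 then PySem.Int.floordiv duration_ms 64 + 192
  else 255

-- ===== PRECONDITION & SPEC =====
def Spec_calc_gas_wait_py (duration_ms : Int) (out : Int) : Prop := out = calc_gas_wait_py_alt duration_ms
instance (duration_ms : Int) (out : Int) : Decidable (Spec_calc_gas_wait_py duration_ms out) := by unfold Spec_calc_gas_wait_py; infer_instance

-- ===== CLAIM (what is proved, stated in full; the proofs are below) =====
def Claim_equal_calc_gas_wait_py : Prop := ∀ (duration_ms : Int), Dom_calc_gas_wait_py duration_ms → Spec_calc_gas_wait_py duration_ms (calc_gas_wait_py duration_ms)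

-- ===== LEMMAS AND PROOFS =====

theorem calcGasWaitLoop_step (d f : Int) (hd : d > 63) :
    calcGasWaitLoop d f =
      if f + 1 > 3 then 255 else calcGasWaitLoop (PySem.Int.floordiv d 4) (f + 1) := by
  rw [calcGasWaitLoop.eq_def]; simp [hd]

theorem calcGasWaitLoop_done (d f : Int) (hd : ¬ d > 63) :
    calcGasWaitLoop d f = d + f * 64 := by
  rw [calcGasWaitLoop.eq_def]; simp [hd]

theorem calc_gas_wait_eq (d : Int) : calc_gas_wait_py d = calc_gas_wait_py_alt d := by
  unfold calc_gas_wait_py calc_gas_wait_py_alt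
  by_cases h0 : d < 64
  · simp [h0]
  · rw [if_neg h0, if_neg h0]
    push_neg at h0
    -- positive divisors throughout: floordiv is Int ediv, which omega understands
    have e4 : PySem.Int.floordiv d 4 = d / 4 :=
      PySem.Int.floordiv_eq_ediv_of_pos (by norm_num)
    have e16 : PySem.Int.floordiv (d / 4) 4 = d / 16 := by
      rw [PySem.Int.floordiv_eq_ediv_of_pos (by norm_num)]; omega
    have e64 : PySem.Int.floordiv (d / 16) 4 = d / 64 := by
      rw [PySem.Int.floordiv_eq_ediv_of_pos (by norm_num)]; omega
    have e16' : PySem.Int.floordiv d 16 = d / 16 :=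
      PySem.Int.floordiv_eq_ediv_of_pos (by norm_num)
    have e64' : PySem.Int.floordiv d 64 = d / 64 :=
      PySem.Int.floordiv_eq_ediv_of_pos (by norm_num)
    rw [calcGasWaitLoop_step d 0 (by omega), if_neg (by norm_num), e4]
    by_cases h1 : d < 256
    · rw [calcGasWaitLoop_done _ _ (by omega)]
      simp only [if_pos h1, e4]; omega
    · push_neg at h1
      rw [calcGasWaitLoop_step _ _ (by omega), if_neg (by norm_num), e16]
      by_cases h2 : d < 1024
      · rw [calcGasWaitLoop_done _ _ (by omega)]
        simp only [if_neg (by omega : ¬ d < 256), if_pos h2, e16']; omega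
      · push_neg at h2
        rw [calcGasWaitLoop_step _ _ (by omega), if_neg (by norm_num), e64]
        by_cases h3 : d < 4096
        · rw [calcGasWaitLoop_done _ _ (by omega)]
          simp only [if_neg (by omega : ¬ d < 256), if_neg (by omega : ¬ d < 1024),
            if_pos h3, e64']; omega
        · push_neg at h3
          rw [calcGasWaitLoop_step _ _ (by omega), if_pos (by norm_num)]
          simp only [if_neg (by omega : ¬ d < 256), if_neg (by omega : ¬ d < 1024),
            if_neg (by omega : ¬ d < 4096)]

-- ===== VERDICT (by name: the statement is the Claim_ definition above) =====
theorem calc_gas_wait_py_spec : Claim_equal_calc_gas_wait_py := by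
  intro d _
  exact calc_gas_wait_eq d
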